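-- pv_equiv track=rewrite | github.com/pypi-data/pypi-mirror-175 | packages/vis-method/vis_method-2.9.2-py3-none-any.whl/vis_method/Hieu.py | _processListSize
-- ===== SOURCE A (Python) =====
-- def _processListSize(listSizeEle):
--     result = []
--     for i in range(len(listSizeEle)):
--         listSizeEle[i] = [(listSizeEle[i][j], listSizeEle[i][j+1])
--                         for j in range(0, len(listSizeEle[i]), 2)]
--         listSizeEle[i].sort(key=lambda x: x[0])
--         listSizeEle[i].sort(key=lambda x: x[0]+x[1])
--     dict_list = {}
--     for i in range(len(listSizeEle)):
--         try:
--             k = dict_list[str(listSizeEle[i])]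
--         except:
--             dict_list[str(listSizeEle[i])] = 1
--             result.append(listSizeEle[i])
--     for i in range(len(result)):
--         dict_ele_size = {}
--         for j in range(len(result[i])):
--             try:
--                 dict_ele_size[f"{result[i][j][0]}_{result[i][j][1]}"] += 1
--             except:
--                 dict_ele_size[f"{result[i][j][0]}_{result[i][j][1]}"] = 1
--         result[i] = dict_ele_size
--     return result
-- ===== SOURCE B (Python) =====
-- def _processListSize(listSizeEle):
--     # Counting-sort strategy: per sublist, tally each (a, b) pair in a dict first,
--     # sort only the distinct pairs by (a+b, a), and rebuild the sorted sublist by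
--     # repeating each distinct pair; the per-sublist count dict is then read off the
--     # tally instead of re-counting the sorted list.  (Mutates listSizeEle in place
--     # like the original; the proved equivalence is about the return value.)
--     result = []
--     seen = set()
--     for i in range(len(listSizeEle)):
--         sub = listSizeEle[i]
--         counts = {}
--         for j in range(0, len(sub), 2):
--             p = (sub[j], sub[j + 1])
--             counts[p] = counts.get(p, 0) + 1
--         order = sorted(counts, key=lambda p: (p[0] + p[1], p[0]))
--         expanded = [p for p in order for _ in range(counts[p])]
--         listSizeEle[i] = expanded
--         key = str(expanded)
--         if key not in seen:
--             seen.add(key)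
--             result.append({f"{a}_{b}": counts[(a, b)] for (a, b) in order})
--     return result
-- ===== Notes on version B (the rewrite author's own statement) =====
-- stated objective: alternative
-- what changed: B replaces A's comparison double-sort of every full sublist plus separate dedup and re-count passes by a counting-sort strategy fused into one pass: it tallies the (a,b) pairs of a sublist into a dict first, sorts only the distinct pairs by (a+b, a), rebuilds the sorted sublist by repeating each distinct pair according to its tally, and reads the per-sublist count dict directly off the tally instead of re-counting the sorted list.
import Mathlib
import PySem

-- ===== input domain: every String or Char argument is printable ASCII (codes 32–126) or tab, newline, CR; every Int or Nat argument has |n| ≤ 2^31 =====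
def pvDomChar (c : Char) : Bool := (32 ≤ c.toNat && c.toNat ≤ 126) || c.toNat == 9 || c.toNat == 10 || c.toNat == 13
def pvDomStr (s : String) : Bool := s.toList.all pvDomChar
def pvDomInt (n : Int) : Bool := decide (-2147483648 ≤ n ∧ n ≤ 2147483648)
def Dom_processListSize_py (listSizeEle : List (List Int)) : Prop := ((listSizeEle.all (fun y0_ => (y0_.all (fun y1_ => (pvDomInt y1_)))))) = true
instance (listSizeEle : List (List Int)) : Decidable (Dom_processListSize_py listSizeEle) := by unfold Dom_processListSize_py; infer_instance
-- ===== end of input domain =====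

-- B replaces A's double-sort + dedup + recount passes by a fused counting-sort pass (tally pairs,
-- sort distinct pairs, rebuild by repetition); return-value equivalence only is proved here (both
-- Pythons mutate listSizeEle[i] in place into the same sorted pair list).


-- ===== PORT A =====
-- str of a Python list of int 2-tuples, e.g. "[(1, 2), (3, 4)]" — ported by hand (exact for
-- this shape: str() of a list of tuples of ints).  Used by both ports (both Pythons call str()).
def pvStrOfPairList (l : List (Int × Int)) : String :=
  "[" ++ PySem.Str.join ", "
    (l.map (fun p => "(" ++ PySem.Int.toStr p.1 ++ ", " ++ PySem.Int.toStr p.2 ++ ")")) ++ "]"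

-- f"{a}_{b}" (used by both Pythons)
def pvKey (p : Int × Int) : String := PySem.Int.toStr p.1 ++ "_" ++ PySem.Int.toStr p.2

-- A, first loop body: pair up and double-sort one sublist
def pvTransform (sub : List Int) : List (Int × Int) :=
  PySem.List.sorted
    (PySem.List.sorted
      ((PySem.List.pyRange 0 (sub.length : Int) 2).map
        (fun j => (PySem.List.pyGetD sub j 0, PySem.List.pyGetD sub (j + 1) 0)))
      (fun x => x.1) false)
    (fun x => x.1 + x.2) false

-- A, third loop body: try/except counting into dict_ele_size
def pvCountA (li : List (Int × Int)) : PySem.Dict String Int :=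
  li.foldl (fun d p =>
    match d.get? (pvKey p) with
    | some v => d.insert (pvKey p) (v + 1)
    | none => d.insert (pvKey p) 1) PySem.Dict.empty

def processListSize_py (listSizeEle : List (List Int)) : List (List (String × Int)) :=
  let ts := listSizeEle.map pvTransform
  let st := ts.foldl
    (fun (st : PySem.Dict String Int × List (List (Int × Int))) li =>
      match st.1.get? (pvStrOfPairList li) with
      | some _ => st
      | none => (st.1.insert (pvStrOfPairList li) 1, st.2 ++ [li]))
    (PySem.Dict.empty, [])
  st.2.map (fun li => (pvCountA li).items)

-- ===== PORT B =====
-- B: tally each (a, b) pair of a sublist (counts[p] = counts.get(p, 0) + 1)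
def pvCountsB (sub : List Int) : PySem.Dict (Int × Int) Int :=
  (PySem.List.pyRange 0 (sub.length : Int) 2).foldl
    (fun d j =>
      let p := (PySem.List.pyGetD sub j 0, PySem.List.pyGetD sub (j + 1) 0)
      d.insert p (d.getD p 0 + 1))
    PySem.Dict.empty

-- B: sorted(counts, key=lambda p: (p[0]+p[1], p[0]))
def pvOrderB (counts : PySem.Dict (Int × Int) Int) : List (Int × Int) :=
  PySem.List.sorted2 counts.keys (fun p => p.1 + p.2) (fun p => p.1) false

-- B: [p for p in order for _ in range(counts[p])]
def pvExpandB (counts : PySem.Dict (Int × Int) Int) (order : List (Int × Int)) : List (Int × Int) :=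
  order.flatMap (fun p => (PySem.List.pyRange 0 (counts.getD p 0) 1).map (fun _ => p))

-- B: {f"{a}_{b}": counts[(a, b)] for (a, b) in order}
def pvResultDictB (counts : PySem.Dict (Int × Int) Int) (order : List (Int × Int)) :
    List (String × Int) :=
  (order.foldl (fun d p => d.insert (pvKey p) (counts.getD p 0)) PySem.Dict.empty).items

def processListSize_py_alt (listSizeEle : List (List Int)) : List (List (String × Int)) :=
  (listSizeEle.foldl
    (fun (st : PySem.Set String × List (List (String × Int))) sub =>
      let counts := pvCountsB sub
      let order := pvOrderB counts
      let key := pvStrOfPairList (pvExpandB counts order)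
      if PySem.Set.contains st.1 key then st
      else (PySem.Set.add st.1 key, st.2 ++ [pvResultDictB counts order]))
    (PySem.Set.empty, [])).2

-- ===== PRECONDITION & SPEC =====
-- A (and B) raise IndexError on a sublist of odd length (sub[j+1] past the end); Pre_ excludes those.
def Pre_processListSize_py (listSizeEle : List (List Int)) : Prop :=
  ∀ sub ∈ listSizeEle, sub.length % 2 = 0
instance (listSizeEle : List (List Int)) : Decidable (Pre_processListSize_py listSizeEle) := by
  unfold Pre_processListSize_py; infer_instance

def pvWitness_processListSize_py : List (List Int) := [[1, 2, 3, 4], [3, 4, 1, 2], [1, 2]]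

def Spec_processListSize_py (listSizeEle : List (List Int)) (out : List (List (String × Int))) : Prop := out = processListSize_py_alt listSizeEle
instance (listSizeEle : List (List Int)) (out : List (List (String × Int))) : Decidable (Spec_processListSize_py listSizeEle out) := by unfold Spec_processListSize_py; infer_instance

-- ===== CLAIM (what is proved, stated in full; the proofs are below) =====
def Claim_equal_processListSize_py : Prop := ∀ (listSizeEle : List (List Int)), Dom_processListSize_py listSizeEle → Pre_processListSize_py listSizeEle → Spec_processListSize_py listSizeEle (processListSize_py listSizeEle)

-- ===== LEMMAS AND PROOFS =====

-- the pair list of one sublist (proof-side name for the expression both ports build)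
def pvP (sub : List Int) : List (Int × Int) :=
  (PySem.List.pyRange 0 (sub.length : Int) 2).map
    (fun j => (PySem.List.pyGetD sub j 0, PySem.List.pyGetD sub (j + 1) 0))

-- ---------- insertBy basics ----------

theorem pv_insertBy_cons {α : Type} (before : α → α → Bool) (x y : α) (ys : List α) :
    PySem.List.insertBy before x (y :: ys) =
      if before x y then x :: y :: ys else y :: PySem.List.insertBy before x ys := rfl

theorem pv_insertBy_pass {α : Type} (before : α → α → Bool) (x : α) :
    ∀ (l1 l2 : List α), (∀ y ∈ l1, before x y = false) →
      PySem.List.insertBy before x (l1 ++ l2) = l1 ++ PySem.List.insertBy before x l2 := by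
  intro l1
  induction l1 with
  | nil => intro l2 _; simp
  | cons y t ih =>
    intro l2 h
    have hy : before x y = false := h y (by simp)
    simp only [List.cons_append, pv_insertBy_cons, hy, Bool.false_eq_true, if_false]
    rw [ih l2 (fun z hz => h z (by simp [hz]))]

theorem pv_insertBy_front {α : Type} (before : α → α → Bool) (x : α) (l : List α)
    (h : ∀ z ∈ l, before x z = true) :
    PySem.List.insertBy before x l = x :: l := by
  cases l with
  | nil => rfl
  | cons z t => simp [pv_insertBy_cons, h z (by simp)]

theorem pv_insertBy_pairwise {α : Type} (before : α → α → Bool)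
    (hasym : ∀ a b, before a b = true → before b a = false)
    (hneg : ∀ a b c, before b a = false → before c b = false → before c a = false) :
    ∀ (acc : List α) (x : α), acc.Pairwise (fun a b => before b a = false) →
      (PySem.List.insertBy before x acc).Pairwise (fun a b => before b a = false) := by
  intro acc
  induction acc with
  | nil => intro x _; simp [PySem.List.insertBy]
  | cons y t ih =>
    intro x hpw
    rw [List.pairwise_cons] at hpw
    obtain ⟨hy, ht⟩ := hpw
    rw [pv_insertBy_cons]
    by_cases hxy : before x y = true
    · rw [if_pos hxy]
      refine List.pairwise_cons.mpr ⟨?_, List.pairwise_cons.mpr ⟨hy, ht⟩⟩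
      intro z hz
      rcases List.mem_cons.mp hz with rfl | hz
      · exact hasym x z hxy
      · exact hneg x y z (hasym x y hxy) (hy z hz)
    · rw [if_neg hxy]
      refine List.pairwise_cons.mpr ⟨?_, ih x ht⟩
      intro z hz
      rw [PySem.List.mem_insertBy] at hz
      rcases hz with rfl | hz
      · exact Bool.eq_false_iff.mpr hxy
      · exact hy z hz

theorem pv_ins_pairwise {α : Type} (before : α → α → Bool)
    (hasym : ∀ a b, before a b = true → before b a = false)
    (hneg : ∀ a b c, before b a = false → before c b = false → before c a = false) :
    ∀ (xs acc : List α), acc.Pairwise (fun a b => before b a = false) →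
      (xs.foldl (fun acc x => PySem.List.insertBy before x acc) acc).Pairwise
        (fun a b => before b a = false) := by
  intro xs
  induction xs with
  | nil => intro acc h; simpa using h
  | cons x t ih =>
    intro acc h
    simp only [List.foldl_cons]
    exact ih _ (pv_insertBy_pairwise before hasym hneg acc x h)

theorem pv_uniq {α : Type} (key : α → Int) :
    ∀ (ys zs : List α), ys.Perm zs → ys.Pairwise (fun a b => key a < key b ∨ a = b) →
      zs.Pairwise (fun a b => key a ≤ key b) → ys = zs := by
  intro ys
  induction ys with
  | nil => intro zs hp _ _; simpa using hp.symm.eq_nil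
  | cons a ys' ih =>
    intro zs hp hy hz
    cases zs with
    | nil => exact absurd hp.eq_nil (by simp)
    | cons b zs' =>
      rw [List.pairwise_cons] at hy hz
      by_cases hab : a = b
      · subst hab
        rw [ih zs' (hp.cons_inv) hy.2 hz.2]
      · -- a ∈ zs', b ∈ ys'
        have ha : a ∈ b :: zs' := hp.mem_iff.mp (by simp)
        have ha' : a ∈ zs' := by
          rcases List.mem_cons.mp ha with h | h
          · exact absurd h hab
          · exact h
        have hb : b ∈ a :: ys' := hp.mem_iff.mpr (by simp)
        have hb' : b ∈ ys' := by
          rcases List.mem_cons.mp hb with h | h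
          · exact absurd h.symm hab
          · exact h
        have h1 : key a < key b := by
          rcases hy.1 b hb' with h | h
          · exact h
          · exact absurd h hab
        have h2 : key b ≤ key a := hz.1 a ha'
        omega


-- ---------- stability / grouping of the library insertion sort ----------

theorem pv_gstep {α : Type} (key : α → Int) (x : α) :
    ∀ (ks : List Int) (F : Int → List α), ks.Pairwise (· < ·) → key x ∈ ks →
      (∀ k ∈ ks, ∀ y ∈ F k, key y = k) →
      PySem.List.insertBy (fun a b => decide (key a < key b)) x (ks.flatMap F) =
        ks.flatMap (fun k => F k ++ if key x == k then [x] else []) := by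
  intro ks
  induction ks with
  | nil => intro F _ hmem _; simp at hmem
  | cons k ks' ih =>
    intro F hpw hmem hF
    rw [List.pairwise_cons] at hpw
    simp only [List.flatMap_cons]
    rcases lt_trichotomy (key x) k with hlt | heq | hgt
    · -- key x < k impossible: key x ∈ k :: ks', all of ks' > k > key x
      exfalso
      rcases List.mem_cons.mp hmem with h | h
      · omega
      · have := hpw.1 _ h; omega
    · -- key x = k: insert at the end of group k, before everything after
      have hFk : ∀ y ∈ F k, (fun a b => decide (key a < key b)) x y = false := by
        intro y hy
        have := hF k (by simp) y hy
        simp [this, heq]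
      rw [pv_insertBy_pass _ _ _ _ hFk]
      have hrest : ∀ z ∈ ks'.flatMap F, (fun a b => decide (key a < key b)) x z = true := by
        intro z hz
        rw [List.mem_flatMap] at hz
        obtain ⟨k', hk', hzk'⟩ := hz
        have hzk : key z = k' := hF k' (by simp [hk']) z hzk'
        have : k < k' := hpw.1 _ hk'
        simp [hzk]; omega
      rw [pv_insertBy_front _ _ _ hrest]
      have : (key x == k) = true := by simp [heq]
      rw [this]
      have hrest2 : ks'.flatMap (fun k => F k ++ if key x == k then [x] else []) = ks'.flatMap F := by
        apply List.flatMap_congr ?_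
        intro k' hk'
        have : k < k' := hpw.1 _ hk'
        have : (key x == k') = false := by simp; omega
        simp [this]
      rw [hrest2]
      simp
    · -- k < key x: pass over group k and recurse
      have hFk : ∀ y ∈ F k, (fun a b => decide (key a < key b)) x y = false := by
        intro y hy
        have := hF k (by simp) y hy
        simp [this]; omega
      rw [pv_insertBy_pass _ _ _ _ hFk]
      have hx' : key x ∈ ks' := by
        rcases List.mem_cons.mp hmem with h | h
        · omega
        · exact h
      rw [ih F hpw.2 hx' (fun k' hk' => hF k' (by simp [hk']))]
      have : (key x == k) = false := by simp; omega
      simp [this]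

theorem pv_group {α : Type} (key : α → Int) :
    ∀ (xs : List α) (ks : List Int), ks.Pairwise (· < ·) → (∀ x ∈ xs, key x ∈ ks) →
      PySem.List.sorted xs key false = ks.flatMap (fun k => xs.filter (fun x => key x == k)) := by
  intro xs
  induction xs using List.reverseRecOn with
  | nil => intro ks _ _; simp [PySem.List.sorted]
  | append_singleton xs x ih =>
    intro ks hpw hcov
    have hs : PySem.List.sorted (xs ++ [x]) key false =
        PySem.List.insertBy (fun a b => decide (key a < key b)) x (PySem.List.sorted xs key false) := by
      rw [PySem.List.sorted_eq_foldl_insertBy, PySem.List.sorted_eq_foldl_insertBy,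
        List.foldl_append]
      rfl
    rw [hs, ih ks hpw (fun y hy => hcov y (by simp [hy]))]
    rw [pv_gstep key x ks _ hpw (hcov x (by simp))
      (fun k hk y hy => by
        rw [List.mem_filter] at hy
        exact (by simpa using hy.2))]
    apply List.flatMap_congr
    intro k _
    rw [List.filter_append]
    simp only [List.filter_cons, List.filter_nil]


-- ---------- order properties of sorted2 (B's sort of the distinct pairs) ----------

theorem pv_order_pairwise (xs : List (Int × Int)) :
    (PySem.List.sorted2 xs (fun p => p.1 + p.2) (fun p => p.1) false).Pairwise
      (fun a b => a.1 + a.2 < b.1 + b.2 ∨ (a.1 + a.2 = b.1 + b.2 ∧ a.1 ≤ b.1)) := by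
  have h : PySem.List.sorted2 xs (fun p => p.1 + p.2) (fun p => p.1) false =
      xs.foldl (fun acc x => PySem.List.insertBy
        (fun a b => decide (a.1 + a.2 < b.1 + b.2) ||
          (!decide (b.1 + b.2 < a.1 + a.2) && decide (a.1 < b.1))) x acc) [] := rfl
  rw [h]
  have hpw := pv_ins_pairwise
    (fun (a b : Int × Int) => decide (a.1 + a.2 < b.1 + b.2) ||
      (!decide (b.1 + b.2 < a.1 + a.2) && decide (a.1 < b.1)))
    (by intro a b hab; simp at hab ⊢; omega)
    (by intro a b c h1 h2; simp at h1 h2 ⊢; omega)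
    xs [] (by simp)
  refine hpw.imp ?_
  intro a b hab
  simp at hab
  omega


-- ---------- counting helpers ----------

theorem pv_countsB_eq (sub : List Int) : pvCountsB sub = PySem.Dict.counter (pvP sub) := by
  rw [← PySem.Dict.foldl_insert_getD_add_one_eq_counter, pvP, List.foldl_map]
  rfl

theorem pv_expand_count (l : List (Int × Int)) (base : List (Int × Int)) (a : Int × Int)
    (hnd : l.Nodup) :
    (l.flatMap (fun p => List.replicate (base.count p) p)).count a =
      if a ∈ l then base.count a else 0 := by
  induction l with
  | nil => simp
  | cons p t ih =>
    rw [List.nodup_cons] at hnd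
    rw [List.flatMap_cons, List.count_append, List.count_replicate, ih hnd.2]
    by_cases hap : a = p
    · subst hap
      simp [hnd.1]
    · have hpa : (p == a) = false := by simp [Ne.symm hap]
      rw [hpa]
      simp only [List.mem_cons]
      by_cases hat : a ∈ t <;> simp [hat, hap]

theorem pv_expand_perm (l base : List (Int × Int)) (hnd : l.Nodup) :
    (l.flatMap (fun p => List.replicate (base.count p) p)).Perm
      (base.filter (fun q => decide (q ∈ l))) := by
  rw [List.perm_iff_count]
  intro a
  rw [pv_expand_count l base a hnd]
  by_cases hal : a ∈ l
  · rw [if_pos hal, List.count_filter (by simp [hal])]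
  · rw [if_neg hal]
    symm
    rw [List.count_eq_zero]
    intro hmem
    exact hal (by simpa using (List.mem_filter.mp hmem).2)


-- ---------- the centrepiece: A's double sort = B's counting-sort reconstruction ----------

-- B's expansion, in replicate form
theorem pv_expandB_eq (sub : List Int) :
    pvExpandB (pvCountsB sub) (pvOrderB (pvCountsB sub)) =
      (pvOrderB (pvCountsB sub)).flatMap
        (fun p => List.replicate ((pvP sub).count p) p) := by
  unfold pvExpandB
  apply List.flatMap_congr
  intro p _
  rw [pv_countsB_eq, PySem.Dict.getD_counter]
  rw [show ((List.count p (pvP sub) : Int)) = ((List.count p (pvP sub) : Nat) : Int) from rfl]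
  rw [PySem.List.pyRange_zero_natCast]
  rw [List.map_map]
  simp [Function.comp_def, List.map_const', List.length_range]

-- the distinct pairs, in sorted2 form
theorem pv_orderB_eq (sub : List Int) :
    pvOrderB (pvCountsB sub) =
      PySem.List.sorted2 (PySem.Set.ofList (pvP sub)) (fun p => p.1 + p.2) (fun p => p.1) false := by
  rw [pvOrderB, pv_countsB_eq, PySem.Dict.keys_counter]

theorem pv_SE (sub : List Int) :
    pvTransform sub = pvExpandB (pvCountsB sub) (pvOrderB (pvCountsB sub)) := by
  rw [pv_expandB_eq, pv_orderB_eq]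
  have hTr : pvTransform sub =
      PySem.List.sorted (PySem.List.sorted (pvP sub) (fun x => x.1) false)
        (fun x => x.1 + x.2) false := rfl
  set P := pvP sub with hP
  set Q := PySem.List.sorted P (fun x : Int × Int => x.1) false with hQ
  set order := PySem.List.sorted2 (PySem.Set.ofList P) (fun p => p.1 + p.2) (fun p => p.1) false
    with horder
  set ks := PySem.List.sorted (PySem.Set.ofList (P.map (fun p => p.1 + p.2))) (fun k => k) false
    with hks
  have hkspw : ks.Pairwise (· < ·) := PySem.List.sorted_ofList_pairwise_lt _
  have hmemks : ∀ p : Int × Int, p ∈ P → p.1 + p.2 ∈ ks := by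
    intro p hp
    rw [hks, PySem.List.mem_sorted, PySem.Set.mem_ofList]
    exact List.mem_map_of_mem hp
  have hQP : Q.Perm P := PySem.List.sorted_perm P _ false
  have hOmem : ∀ p : Int × Int, p ∈ order ↔ p ∈ P := by
    intro p
    rw [horder, (PySem.List.sorted2_perm _ _ _ _).mem_iff, PySem.Set.mem_ofList]
  have hOnd : order.Nodup := (PySem.List.sorted2_perm _ _ _ _).symm.nodup
    (PySem.Set.nodup_ofList _)
  have hOpw := pv_order_pairwise (PySem.Set.ofList P)
  rw [← horder] at hOpw
  -- (1) A's outer sort groups Q's elements by a+b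
  have h1 : pvTransform sub =
      ks.flatMap (fun k => Q.filter (fun x => x.1 + x.2 == k)) := by
    rw [hTr]
    exact pv_group _ Q ks hkspw (fun x hx => hmemks x (hQP.mem_iff.mp hx))
  -- (2) order groups itself by a+b
  have h2 : order = ks.flatMap (fun k => order.filter (fun p => p.1 + p.2 == k)) := by
    have hself : PySem.List.sorted order (fun p : Int × Int => p.1 + p.2) false = order :=
      PySem.List.sorted_eq_self_of_pairwise _ _ (hOpw.imp (by intro a b h; omega))
    have hgrp := pv_group (fun x : Int × Int => x.1 + x.2) order ks hkspw
      (fun x hx => hmemks x ((hOmem x).mp hx))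
    rw [hself] at hgrp
    exact hgrp
  -- (4) classwise: Q's group k is the expansion of order's group k
  have h4 : ∀ k, (order.filter (fun p => p.1 + p.2 == k)).flatMap
      (fun p => List.replicate (P.count p) p) = Q.filter (fun x => x.1 + x.2 == k) := by
    intro k
    apply pv_uniq (fun p : Int × Int => p.1)
    · -- Perm: both sides ~ P.filter (class k)
      have hp1 : ((order.filter (fun p => p.1 + p.2 == k)).flatMap
          (fun p => List.replicate (P.count p) p)).Perm
          (P.filter (fun q => decide (q ∈ order.filter (fun p => p.1 + p.2 == k)))) :=
        pv_expand_perm _ P (hOnd.filter _)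
      have hfc : P.filter (fun q => decide (q ∈ order.filter (fun p => p.1 + p.2 == k))) =
          P.filter (fun x => x.1 + x.2 == k) := by
        apply List.filter_congr
        intro q hq
        simp only [List.mem_filter, hOmem q, hq, true_and]
        by_cases h : (q.1 + q.2 == k) = true <;> simp [h]
      rw [hfc] at hp1
      exact hp1.trans (hQP.filter _).symm
    · -- strictly sorted up to equal elements, by the second key p.1
      rw [List.pairwise_flatMap]
      constructor
      · intro p _
        rw [List.pairwise_replicate]
        right; right; rfl
      · have hpwf : (order.filter (fun p => p.1 + p.2 == k)).Pairwise
            (fun a b => a.1 < b.1 ∨ a = b) := by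
          have h5 := (hOpw.filter (fun p => p.1 + p.2 == k))
          refine List.Pairwise.imp_of_mem ?_ h5
          intro a b ha hb hab
          have hka : a.1 + a.2 = k := by simpa using (List.mem_filter.mp ha).2
          have hkb : b.1 + b.2 = k := by simpa using (List.mem_filter.mp hb).2
          rcases hab with h | h
          · omega
          · rcases lt_or_eq_of_le h.2 with h' | h'
            · exact Or.inl h'
            · right
              have : a.2 = b.2 := by omega
              exact Prod.ext h' this
        refine hpwf.imp_of_mem ?_
        intro a b _ _ hab x hx y hy
        rw [List.eq_of_mem_replicate hx, List.eq_of_mem_replicate hy]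
        exact hab
    · exact (PySem.List.sorted_pairwise P (fun x : Int × Int => x.1)).filter _
  -- assemble
  rw [h1]
  conv_rhs => rw [h2]
  rw [List.flatMap_assoc]
  apply List.flatMap_congr
  intro k _
  exact (h4 k).symm


-- ---------- str(int) is injective (the distinct pairs produce distinct dict keys) ----------

def pvVal (l : List Char) : Nat := l.foldl (fun a c => a * 10 + (c.toNat - 48)) 0

theorem pv_digitChar_spec (m : Nat) (h : m < 10) :
    (Nat.digitChar m).toNat = 48 + m := by
  interval_cases m <;> rfl

theorem pv_tdc_spec : ∀ (fuel n : Nat) (ds : List Char), n < fuel →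
    ∃ dl, Nat.toDigitsCore 10 fuel n ds = dl ++ ds ∧ dl ≠ [] ∧
      (∀ c ∈ dl, 48 ≤ c.toNat ∧ c.toNat ≤ 57) ∧ pvVal dl = n := by
  intro fuel
  induction fuel with
  | zero => intro n ds h; omega
  | succ fuel ih =>
    intro n ds _h
    rw [Nat.toDigitsCore]
    by_cases h0 : n / 10 = 0
    · rw [if_pos h0]
      refine ⟨[Nat.digitChar (n % 10)], rfl, by simp, ?_, ?_⟩
      · intro c hc
        rw [List.mem_singleton] at hc
        subst hc
        rw [pv_digitChar_spec _ (Nat.mod_lt n (by norm_num))]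
        omega
      · rw [pvVal, List.foldl_cons, List.foldl_nil,
          pv_digitChar_spec _ (Nat.mod_lt n (by norm_num))]
        omega
    · rw [if_neg h0]
      have hn10 : n / 10 < fuel := by omega
      obtain ⟨dl, heq, hne, hdig, hval⟩ := ih (n / 10) (Nat.digitChar (n % 10) :: ds) hn10
      refine ⟨dl ++ [Nat.digitChar (n % 10)], by rw [heq]; simp, by simp, ?_, ?_⟩
      · intro c hc
        rcases List.mem_append.mp hc with h | h
        · exact hdig c h
        · rw [List.mem_singleton] at h
          subst h
          rw [pv_digitChar_spec _ (Nat.mod_lt n (by norm_num))]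
          omega
      · rw [pvVal, List.foldl_append, List.foldl_cons, List.foldl_nil,
          show List.foldl (fun a c => a * 10 + (c.toNat - 48)) 0 dl = pvVal dl from rfl,
          hval, pv_digitChar_spec _ (Nat.mod_lt n (by norm_num))]
        omega

theorem pv_toDigits_spec (n : Nat) :
    Nat.toDigits 10 n ≠ [] ∧ (∀ c ∈ Nat.toDigits 10 n, 48 ≤ c.toNat ∧ c.toNat ≤ 57) ∧
      pvVal (Nat.toDigits 10 n) = n := by
  obtain ⟨dl, heq, hne, hdig, hval⟩ := pv_tdc_spec (n + 1) n [] (by omega)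
  rw [Nat.toDigits, heq, List.append_nil]
  exact ⟨hne, hdig, hval⟩

theorem pv_toChars_spec (n : Int) :
    PySem.Int.toChars n ≠ [] ∧ ∀ c ∈ PySem.Int.toChars n, (48 ≤ c.toNat ∧ c.toNat ≤ 57) ∨ c = '-' := by
  rw [PySem.Int.toChars]
  split_ifs with h
  · refine ⟨by simp, ?_⟩
    intro c hc
    rcases List.mem_cons.mp hc with rfl | hc
    · right; rfl
    · exact Or.inl ((pv_toDigits_spec _).2.1 c hc)
  · exact ⟨(pv_toDigits_spec _).1, fun c hc => Or.inl ((pv_toDigits_spec _).2.1 c hc)⟩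

theorem pv_toChars_inj : Function.Injective PySem.Int.toChars := by
  intro a b hab
  rw [PySem.Int.toChars, PySem.Int.toChars] at hab
  have hinj : ∀ x y : Nat, Nat.toDigits 10 x = Nat.toDigits 10 y → x = y := by
    intro x y h
    have hx := (pv_toDigits_spec x).2.2
    have hy := (pv_toDigits_spec y).2.2
    rw [← hx, ← hy, h]
  split_ifs at hab with h1 h2 h2
  · have h := hinj _ _ (by injection hab)
    omega
  · -- '-' :: digits = digits: head of RHS is a digit, contradiction
    exfalso
    obtain ⟨hne, hdig, _⟩ := pv_toDigits_spec b.toNat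
    cases hb : Nat.toDigits 10 b.toNat with
    | nil => exact hne hb
    | cons c cs =>
      rw [hb] at hab
      have hcm : '-' = c := by injection hab
      have hd := hdig c (by rw [hb]; simp)
      rw [← hcm] at hd
      have h45 : ('-' : Char).toNat = 45 := rfl
      rw [h45] at hd
      omega
  · exfalso
    obtain ⟨hne, hdig, _⟩ := pv_toDigits_spec a.toNat
    cases ha : Nat.toDigits 10 a.toNat with
    | nil => exact hne ha
    | cons c cs =>
      rw [ha] at hab
      have hcm : c = '-' := by injection hab
      have hd := hdig c (by rw [ha]; simp)
      rw [hcm] at hd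
      have h45 : ('-' : Char).toNat = 45 := rfl
      rw [h45] at hd
      omega
  · have := hinj _ _ hab
    omega

theorem pv_toChars_no_underscore (n : Int) : '_' ∉ PySem.Int.toChars n := by
  intro h
  rcases (pv_toChars_spec n).2 _ h with h' | h'
  · have h95 : ('_' : Char).toNat = 95 := rfl
    rw [h95] at h'
    omega
  · exact absurd h' (by decide)

theorem pv_split_underscore :
    ∀ (l1 : List Char) (l2 : List Char) (l1' l2' : List Char), '_' ∉ l1 → '_' ∉ l1' →
      l1 ++ '_' :: l2 = l1' ++ '_' :: l2' → l1 = l1' ∧ l2 = l2' := by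
  intro l1
  induction l1 with
  | nil =>
    intro l2 l1' l2' _ h1' heq
    cases l1' with
    | nil => simpa using heq
    | cons c t =>
      exfalso
      rw [List.nil_append, List.cons_append] at heq
      have : '_' = c := by injection heq
      exact h1' (by rw [this]; simp)
  | cons c t ih =>
    intro l2 l1' l2' h1 h1' heq
    cases l1' with
    | nil =>
      exfalso
      rw [List.nil_append, List.cons_append] at heq
      have : c = '_' := by injection heq
      exact h1 (by rw [← this]; simp)
    | cons c' t' =>
      rw [List.cons_append, List.cons_append] at heq
      have hc : c = c' := by injection heq
      have ht : t ++ '_' :: l2 = t' ++ '_' :: l2' := by injection heq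
      obtain ⟨h1t, h2t⟩ := ih l2 t' l2' (fun h => h1 (by simp [h])) (fun h => h1' (by simp [h])) ht
      exact ⟨by rw [hc, h1t], h2t⟩

theorem pv_key_inj : Function.Injective pvKey := by
  intro p q hpq
  have h : (pvKey p).toList = (pvKey q).toList := by rw [hpq]
  rw [pvKey, pvKey] at h
  simp only [String.toList_append, PySem.Int.toList_toStr] at h
  have hu : ("_" : String).toList = ['_'] := rfl
  rw [hu, List.append_assoc, List.append_assoc, List.singleton_append] at h
  have h' : PySem.Int.toChars p.1 ++ '_' :: PySem.Int.toChars p.2 =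
      PySem.Int.toChars q.1 ++ '_' :: PySem.Int.toChars q.2 := h
  obtain ⟨h1, h2⟩ := pv_split_underscore _ _ _ _
    (pv_toChars_no_underscore p.1) (pv_toChars_no_underscore q.1) h'
  exact Prod.ext (pv_toChars_inj h1) (pv_toChars_inj h2)


-- ---------- the per-sublist result dictionaries agree ----------

theorem pv_countA_eq (li : List (Int × Int)) :
    pvCountA li = PySem.Dict.counter (li.map pvKey) := by
  rw [← PySem.Dict.foldl_insert_getD_add_one_eq_counter, List.foldl_map, pvCountA]
  congr 1
  funext d p
  cases h : d.get? (pvKey p) <;>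
    simp [PySem.Dict.getD_eq_get?_getD, h]

theorem pv_replicate_add {β : Type} [BEq β] [LawfulBEq β] (x : β) :
    ∀ (n : Nat) (acc : PySem.Set β), x ∈ acc →
      List.foldl PySem.Set.add acc (List.replicate n x) = acc := by
  intro n
  induction n with
  | zero => intro acc _; simp
  | succ n ih =>
    intro acc hx
    rw [List.replicate_succ, List.foldl_cons, PySem.Set.add_of_mem hx]
    exact ih acc hx

theorem pv_foldl_add_expand {β : Type} [BEq β] [LawfulBEq β] :
    ∀ (l : List (β × Nat)) (acc : PySem.Set β), (l.map Prod.fst).Nodup →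
      (∀ q ∈ l, q.1 ∉ acc) → (∀ q ∈ l, 1 ≤ q.2) →
      List.foldl PySem.Set.add acc (l.flatMap (fun q => List.replicate q.2 q.1)) =
        acc ++ l.map Prod.fst := by
  intro l
  induction l with
  | nil => intro acc _ _ _; simp
  | cons q t ih =>
    intro acc hnd hdisj hpos
    rw [List.map_cons, List.nodup_cons] at hnd
    rw [List.flatMap_cons, List.foldl_append]
    obtain ⟨m, hm⟩ : ∃ m, q.2 = m + 1 := ⟨q.2 - 1, by have := hpos q (by simp); omega⟩
    rw [hm, List.replicate_succ, List.foldl_cons,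
      PySem.Set.add_of_not_mem (hdisj q (by simp)),
      pv_replicate_add q.1 m _ (by simp)]
    rw [ih _ hnd.2 (fun r hr => by
      simp only [List.mem_append, List.mem_singleton]
      rintro (h | h)
      · exact hdisj r (by simp [hr]) h
      · exact hnd.1 (h ▸ List.mem_map_of_mem hr)) (fun r hr => hpos r (by simp [hr]))]
    simp


theorem pv_S_perm (sub : List Int) : (pvTransform sub).Perm (pvP sub) :=
  (PySem.List.sorted_perm _ _ false).trans (PySem.List.sorted_perm _ _ false)

theorem pv_S_repl (sub : List Int) :
    pvTransform sub = (pvOrderB (pvCountsB sub)).flatMap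
      (fun p => List.replicate ((pvP sub).count p) p) := by
  rw [pv_SE, pv_expandB_eq]

theorem pv_order_nodup (sub : List Int) : (pvOrderB (pvCountsB sub)).Nodup := by
  rw [pv_orderB_eq]
  exact (PySem.List.sorted2_perm _ _ _ _).symm.nodup (PySem.Set.nodup_ofList _)

theorem pv_order_mem (sub : List Int) (p : Int × Int) :
    p ∈ pvOrderB (pvCountsB sub) ↔ p ∈ pvP sub := by
  rw [pv_orderB_eq, (PySem.List.sorted2_perm _ _ _ _).mem_iff, PySem.Set.mem_ofList]

theorem pv_dict_eq (sub : List Int) :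
    (pvCountA (pvTransform sub)).items = pvResultDictB (pvCountsB sub) (pvOrderB (pvCountsB sub)) := by
  have hknd : ((pvOrderB (pvCountsB sub)).map pvKey).Nodup :=
    (pv_order_nodup sub).map pv_key_inj
  -- RHS: B's dict comprehension lists the distinct pairs with their tallies
  have hR : pvResultDictB (pvCountsB sub) (pvOrderB (pvCountsB sub)) =
      (pvOrderB (pvCountsB sub)).map (fun p => (pvKey p, ((pvP sub).count p : Int))) := by
    rw [pvResultDictB,
      PySem.Dict.items_foldl_insert_fresh _ pvKey _ PySem.Dict.empty
        (fun a _ => PySem.Dict.contains_empty _) hknd]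
    rw [show (PySem.Dict.empty : PySem.Dict String Int).items = [] from rfl, List.nil_append]
    apply List.map_congr_left
    intro p _
    rw [pv_countsB_eq, PySem.Dict.getD_counter]
  -- LHS: A's counting loop over the sorted list is Counter(map key)
  have hmapS : (pvTransform sub).map pvKey =
      ((pvOrderB (pvCountsB sub)).map (fun p => (pvKey p, (pvP sub).count p))).flatMap
        (fun q => List.replicate q.2 q.1) := by
    rw [pv_S_repl, List.map_flatMap, List.flatMap_map]
    apply List.flatMap_congr
    intro p _
    rw [List.map_replicate]
  have hset : PySem.Set.ofList ((pvTransform sub).map pvKey) =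
      (pvOrderB (pvCountsB sub)).map pvKey := by
    rw [hmapS, PySem.Set.ofList_eq_foldl,
      pv_foldl_add_expand _ [] (by simpa [List.map_map] using hknd) (by simp)
        (fun q hq => by
          obtain ⟨p, hp, rfl⟩ := List.mem_map.mp hq
          have : p ∈ pvP sub := (pv_order_mem sub p).mp hp
          have := List.count_pos_iff.mpr this
          omega)]
    simp [List.map_map]
  have hcount : ∀ p ∈ pvOrderB (pvCountsB sub),
      List.count (pvKey p) ((pvTransform sub).map pvKey) = (pvP sub).count p := by
    intro p _
    rw [List.count_map_of_injective _ _ pv_key_inj]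
    exact (pv_S_perm sub).count_eq p
  rw [pv_countA_eq, PySem.Dict.items_counter, hset, hR, List.map_map]
  apply List.map_congr_left
  intro p hp
  simp only [Function.comp_apply]
  rw [hcount p hp]

-- ---------- the outer loops agree ----------
theorem pv_stepB (st : PySem.Set String × List (List (String × Int))) (sub : List Int) :
    (let counts := pvCountsB sub
     let order := pvOrderB counts
     let key := pvStrOfPairList (pvExpandB counts order)
     if PySem.Set.contains st.1 key then st
     else (PySem.Set.add st.1 key, st.2 ++ [pvResultDictB counts order])) =
    (if PySem.Set.contains st.1 (pvStrOfPairList (pvTransform sub)) then st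
     else (PySem.Set.add st.1 (pvStrOfPairList (pvTransform sub)),
       st.2 ++ [(pvCountA (pvTransform sub)).items])) := by
  simp only [← pv_SE, pv_dict_eq]

theorem pv_main_core (xs : List (List Int)) :
    ∀ (d : PySem.Dict String Int) (seen : PySem.Set String)
      (accA : List (List (Int × Int))) (accB : List (List (String × Int))),
      (∀ k, d.contains k = PySem.Set.contains seen k) →
      accB = accA.map (fun li => (pvCountA li).items) →
      (xs.foldl
        (fun (st : PySem.Set String × List (List (String × Int))) sub =>
          if PySem.Set.contains st.1 (pvStrOfPairList (pvTransform sub)) then st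
          else (PySem.Set.add st.1 (pvStrOfPairList (pvTransform sub)),
            st.2 ++ [(pvCountA (pvTransform sub)).items]))
        (seen, accB)).2 =
      (((xs.map pvTransform).foldl
        (fun (st : PySem.Dict String Int × List (List (Int × Int))) li =>
          match st.1.get? (pvStrOfPairList li) with
          | some _ => st
          | none => (st.1.insert (pvStrOfPairList li) 1, st.2 ++ [li]))
        (d, accA)).2).map (fun li => (pvCountA li).items) := by
  induction xs with
  | nil => intro d seen accA accB hinv hacc; simpa using hacc
  | cons x rest ih =>
    intro d seen accA accB hinv hacc
    simp only [List.map_cons, List.foldl_cons]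
    by_cases hs : PySem.Set.contains seen (pvStrOfPairList (pvTransform x)) = true
    · have hdc : d.contains (pvStrOfPairList (pvTransform x)) = true := by
        rw [hinv]; exact hs
      rw [PySem.Dict.contains_eq_isSome_get?] at hdc
      obtain ⟨v, hv⟩ := Option.isSome_iff_exists.mp hdc
      simp only [hs, if_true, hv]
      exact ih d seen accA accB hinv hacc
    · have hs' : PySem.Set.contains seen (pvStrOfPairList (pvTransform x)) = false :=
        Bool.eq_false_iff.mpr hs
      have hdc : d.contains (pvStrOfPairList (pvTransform x)) = false := by
        rw [hinv]; exact hs'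
      have hnone : d.get? (pvStrOfPairList (pvTransform x)) = none := by
        rw [PySem.Dict.get?_eq_none_iff_contains]; exact hdc
      simp only [hs', if_neg, Bool.false_eq_true, not_false_eq_true, hnone]
      apply ih
      · have hadd : PySem.Set.add seen (pvStrOfPairList (pvTransform x))
            = seen ++ [pvStrOfPairList (pvTransform x)] := by
          simp only [PySem.Set.add, hs', Bool.false_eq_true, if_false]
        intro k
        rw [PySem.Dict.contains_insert, hadd]
        by_cases hk : k = pvStrOfPairList (pvTransform x)
        · subst hk; simp
        · simp [hk, hinv k]
      · simp [hacc]

theorem pv_main (xs : List (List Int)) :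
    ∀ (d : PySem.Dict String Int) (seen : PySem.Set String)
      (accA : List (List (Int × Int))) (accB : List (List (String × Int))),
      (∀ k, d.contains k = PySem.Set.contains seen k) →
      accB = accA.map (fun li => (pvCountA li).items) →
      (xs.foldl
        (fun (st : PySem.Set String × List (List (String × Int))) sub =>
          let counts := pvCountsB sub
          let order := pvOrderB counts
          let key := pvStrOfPairList (pvExpandB counts order)
          if PySem.Set.contains st.1 key then st
          else (PySem.Set.add st.1 key, st.2 ++ [pvResultDictB counts order]))
        (seen, accB)).2 =
      (((xs.map pvTransform).foldl
        (fun (st : PySem.Dict String Int × List (List (Int × Int))) li =>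
          match st.1.get? (pvStrOfPairList li) with
          | some _ => st
          | none => (st.1.insert (pvStrOfPairList li) 1, st.2 ++ [li]))
        (d, accA)).2).map (fun li => (pvCountA li).items) := by
  intro d seen accA accB hinv hacc
  rw [PySem.List.foldl_congr_mem xs _
    (fun (st : PySem.Set String × List (List (String × Int))) sub =>
      if PySem.Set.contains st.1 (pvStrOfPairList (pvTransform sub)) then st
      else (PySem.Set.add st.1 (pvStrOfPairList (pvTransform sub)),
        st.2 ++ [(pvCountA (pvTransform sub)).items]))
    (seen, accB) (fun acc x _ => pv_stepB acc x)]
  exact pv_main_core xs d seen accA accB hinv hacc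

-- ===== VERDICT (by name: the statement is the Claim_ definition above) =====
theorem processListSize_py_spec : Claim_equal_processListSize_py := by
  intro xs _ _
  unfold Spec_processListSize_py processListSize_py processListSize_py_alt
  exact (pv_main xs PySem.Dict.empty PySem.Set.empty [] []
    (fun k => by simp [PySem.Dict.contains_empty, PySem.Set.empty, PySem.Set.contains])
    rfl).symm
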